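-- pv_equiv track=rewrite | github.com/Lucas-Blanger/Competitive-problems | Python/2906.py | limpar
-- ===== SOURCE A (Python) =====
-- def limpar(s):
--     resultado = []
--     for c in s:
--         if c == ".":
--             continue
--         if c == "+":
--             break
--         resultado.append(c)
--     return "".join(resultado)
-- ===== SOURCE B (Python) =====
-- def limpar(s):
--     i = s.find('+')
--     head = s if i < 0 else s[:i]
--     return ''.join(c for c in head if c != '.')
-- ===== Notes on version B (the rewrite author's own statement) =====
-- stated objective: idiomatic
-- what changed: Replaces the explicit character loop with continue/break and an accumulator by locating the first '+' with str.find, slicing the head, and filtering dots in one comprehension join.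
import Mathlib
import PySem

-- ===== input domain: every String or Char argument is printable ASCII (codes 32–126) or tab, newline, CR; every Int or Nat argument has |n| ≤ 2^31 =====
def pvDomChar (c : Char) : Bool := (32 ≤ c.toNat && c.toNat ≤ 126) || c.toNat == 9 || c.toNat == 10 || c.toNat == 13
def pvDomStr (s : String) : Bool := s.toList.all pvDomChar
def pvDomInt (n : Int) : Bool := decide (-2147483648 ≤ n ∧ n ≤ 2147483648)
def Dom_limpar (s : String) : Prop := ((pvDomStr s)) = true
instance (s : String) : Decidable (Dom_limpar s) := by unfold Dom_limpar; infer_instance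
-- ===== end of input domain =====

-- B replaces A's explicit character loop (continue/break, accumulator) by find('+') + slice + a filtering join; objective: idiomatic.

-- ===== PORT A =====
-- the for-loop over s with accumulator `resultado`; '.' → continue, '+' → break
def limparGo (acc : List Char) : List Char → List Char
  | [] => acc
  | c :: rest =>
    if c = '.' then limparGo acc rest
    else if c = '+' then acc
    else limparGo (acc ++ [c]) rest

def limpar (s : String) : String := String.mk (limparGo [] s.toList)

-- ===== PORT B =====
def limpar_alt (s : String) : String :=
  let i : Int := PySem.Chars.find s.toList ['+']
  let head : List Char := if i < 0 then s.toList else PySem.List.slice s.toList none (some i)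
  String.mk (head.filter (fun c => c != '.'))

-- ===== PRECONDITION & SPEC =====
def Spec_limpar (s : String) (out : String) : Prop := out = limpar_alt s
instance (s : String) (out : String) : Decidable (Spec_limpar s out) := by unfold Spec_limpar; infer_instance

-- ===== CLAIM (what is proved, stated in full; the proofs are below) =====
def Claim_equal_limpar : Prop := ∀ (s : String), Dom_limpar s → Spec_limpar s (limpar s)

-- ===== LEMMAS AND PROOFS =====

-- A's loop is: append the (dot-filtered) chars before the first '+'
theorem limparGo_eq (l : List Char) : ∀ (acc : List Char),
    limparGo acc l = acc ++ (l.takeWhile (· != '+')).filter (· != '.') := by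
  induction l with
  | nil => intro acc; simp [limparGo]
  | cons c rest ih =>
    intro acc
    by_cases hdot : c = '.'
    · subst hdot; simp [limparGo, ih, List.takeWhile]
    · by_cases hplus : c = '+'
      · subst hplus; simp [limparGo, List.takeWhile]
      · simp [limparGo, hdot, hplus, ih]

theorem takeWhile_eq_take_char (l : List Char) : ∀ (n : Nat), n ≤ l.length →
    (∀ i, i < n → l[i]? ≠ some '+') →
    (∀ h : n < l.length, l[n]? = some '+') →
    l.takeWhile (· != '+') = l.take n := by
  induction l with
  | nil => intro n _ _ _; simp_all
  | cons c rest ih =>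
    intro n hn h1 h2
    cases n with
    | zero =>
      have := h2 (by simp)
      simp at this
      simp [List.takeWhile, this]
    | succ m =>
      have hc : c ≠ '+' := by
        have := h1 0 (by omega); simpa using this
      simp only [List.takeWhile_cons, bne_iff_ne, ne_eq, hc, not_false_eq_true, if_true,
        List.take_succ_cons, List.cons.injEq, true_and]
      exact ih m (by simpa using hn)
        (fun i hi => by simpa using h1 (i+1) (by omega))
        (fun h => by simpa using h2 (by simpa using h))

theorem singleton_prefix_iff (c : Char) (l : List Char) :
    [c] <+: l ↔ l[0]? = some c := by
  cases l with
  | nil => simp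
  | cons a t => simp [List.cons_prefix_cons, eq_comm]

-- ===== VERDICT (by name: the statement is the Claim_ definition above) =====
theorem limpar_spec : Claim_equal_limpar := by
  intro s _
  unfold Spec_limpar limpar limpar_alt
  rw [limparGo_eq]
  set l := s.toList with hl
  simp only [List.nil_append]
  by_cases hneg : PySem.Chars.find l ['+'] < 0
  · -- no '+' in l
    have hnot : ¬ ['+'] <:+: l := by
      rw [← PySem.Chars.find_eq_neg_one_iff]
      have := PySem.Chars.neg_one_le_find l ['+']
      omega
    have hmem : '+' ∉ l := by
      intro hm
      obtain ⟨u, v, huv⟩ := List.mem_iff_append.mp hm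
      exact hnot ⟨u, v, by rw [huv]; simp⟩
    have : l.takeWhile (· != '+') = l := by
      apply List.takeWhile_eq_self_iff.mpr
      intro x hx; simp; intro h; subst h; exact hmem hx
    simp [hneg, this]
  · -- '+' occurs; find is its first index
    have hnn : 0 ≤ PySem.Chars.find l ['+'] := by omega
    set f := PySem.Chars.find l ['+'] with hf
    have hne : f ≠ -1 := by omega
    have hspec := PySem.Chars.findFrom_natCast_spec l ['+'] 0 (by simp)
      (by simpa [PySem.Chars.findFrom_zero, ← hf] using hne)
    norm_num [PySem.Chars.findFrom_zero, ← hf] at hspec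
    obtain ⟨-, hpre, hmin⟩ := hspec
    have hlen : f.toNat < l.length := by
      have h1 : ['+'].length ≤ (l.drop f.toNat).length := hpre.length_le
      simp at h1
      omega
    have hpre0 : (l.drop f.toNat)[0]? = some '+' := (singleton_prefix_iff _ _).mp hpre
    have hat : l[f.toNat]? = some '+' := by
      rw [List.getElem?_drop] at hpre0; simpa using hpre0
    have hslice : PySem.List.slice l none (some f) = l.take f.toNat :=
      PySem.List.slice_to l hnn
    have htw : l.takeWhile (· != '+') = l.take f.toNat := by
      apply takeWhile_eq_take_char l f.toNat (by omega)
      · intro i hi hsome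
        have : ¬ ['+'] <+: l.drop i := hmin i (by omega)
        apply this
        rw [singleton_prefix_iff, List.getElem?_drop]
        simpa using hsome
      · intro _; exact hat
    simp [hneg, hslice, htw]
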